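-- pv_equiv track=rewrite | github.com/octave-commons/fork_tales | part64/code/world_web/simulation_test_artifacts.py | line_hits_to_spans
-- ===== SOURCE A (Python) =====
-- from typing import Any, Callable
--
-- def line_hits_to_spans(hits: list[tuple[int, int]]) -> list[dict[str, Any]]:
--     sorted_hits = sorted(
--         [(line, count) for line, count in hits if count > 0], key=lambda row: row[0]
--     )
--     if not sorted_hits:
--         return []
--     spans: list[dict[str, Any]] = []
--     start_line, prev_line, total_hits = (
--         sorted_hits[0][0],
--         sorted_hits[0][0],
--         sorted_hits[0][1],
--     )
--     for line, count in sorted_hits[1:]: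
--         if line <= prev_line + 1:
--             prev_line = line
--             total_hits += count
--         else:
--             spans.append(
--                 {
--                     "start_line": start_line,
--                     "end_line": prev_line,
--                     "hits": total_hits,
--                 }
--             )
--             start_line, prev_line, total_hits = line, line, count
--     spans.append({"start_line": start_line, "end_line": prev_line, "hits": total_hits})
--     return spans
-- ===== SOURCE B (Python) =====
-- def line_hits_to_spans(hits):
--     totals = {}
--     for line, count in hits:
--         if count > 0:
--             totals[line] = totals.get(line, 0) + count
--     spans = []
--     for line in reversed(sorted(totals)):
--         count = totals[line]
--         if spans and spans[0]["start_line"] == line + 1: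
--             first = spans[0]
--             spans[0] = {
--                 "start_line": line,
--                 "end_line": first["end_line"],
--                 "hits": first["hits"] + count,
--             }
--         else:
--             spans.insert(0, {"start_line": line, "end_line": line, "hits": count})
--     return spans
-- ===== Notes on version B (the rewrite author's own statement) =====
-- stated objective: alternative
-- what changed: A sorts the positive (line,count) pairs and runs a single forward pass with a running start/prev/total accumulator; B first aggregates counts per line into a dict, then folds over the distinct sorted lines in reverse, building the span list back-to-front by merging each line into the head span or prepending a fresh one.
import Mathlib
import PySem

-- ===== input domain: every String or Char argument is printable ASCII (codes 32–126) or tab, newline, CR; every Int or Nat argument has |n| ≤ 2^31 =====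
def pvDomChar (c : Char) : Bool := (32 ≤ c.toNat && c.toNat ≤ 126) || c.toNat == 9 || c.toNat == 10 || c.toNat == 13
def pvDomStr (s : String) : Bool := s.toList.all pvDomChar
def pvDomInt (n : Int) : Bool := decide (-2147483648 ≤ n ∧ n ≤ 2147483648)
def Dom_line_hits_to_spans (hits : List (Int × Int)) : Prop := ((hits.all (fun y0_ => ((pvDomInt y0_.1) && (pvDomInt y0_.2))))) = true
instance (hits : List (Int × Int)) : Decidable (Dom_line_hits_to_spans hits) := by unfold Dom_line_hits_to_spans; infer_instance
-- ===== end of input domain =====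

-- B replaces A's sorted single forward pass (running start/prev/total accumulator) by a per-line dict
-- aggregation followed by a backwards fold over the distinct sorted lines that builds the span list
-- back-to-front, merging into or prepending before the head span (objective: alternative, same cost).

-- ===== PORT A =====
-- a span dict {'start_line': st, 'end_line': en, 'hits': h} as an association list
def pvMkSpan (st en h : Int) : List (String × Int) :=
  [("start_line", st), ("end_line", en), ("hits", h)]

-- A's loop body on the state (spans, start_line, prev_line, total_hits)
def pvStepA (acc : List (List (String × Int)) × Int × Int × Int) (p : Int × Int) :
    List (List (String × Int)) × Int × Int × Int :=
  if p.1 ≤ acc.2.2.1 + 1 then (acc.1, acc.2.1, p.1, acc.2.2.2 + p.2)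
  else (acc.1 ++ [pvMkSpan acc.2.1 acc.2.2.1 acc.2.2.2], p.1, p.1, p.2)

def line_hits_to_spans (hits : List (Int × Int)) : List (List (String × Int)) :=
  let sorted_hits := PySem.List.sorted (hits.filter (fun p => decide (0 < p.2))) (fun row => row.1) false
  match sorted_hits with
  | [] => []
  | (l, c) :: rest =>
    let r := rest.foldl pvStepA ([], l, l, c)
    r.1 ++ [pvMkSpan r.2.1 r.2.2.1 r.2.2.2]

-- ===== PORT B =====
-- spans[0]["key"]: first-match lookup in the span association list (the key is always present in B's spans)
def pvGetKey (s : List (String × Int)) (k : String) : Int :=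
  ((s.find? (fun q => q.1 == k)).map (·.2)).getD 0

-- B's loop body: merge the line into the head span, or prepend a fresh singleton span
def pvStepB (totals : PySem.Dict Int Int) (spans : List (List (String × Int))) (line : Int) :
    List (List (String × Int)) :=
  let count := totals.getD line 0
  match spans with
  | first :: rest =>
    if pvGetKey first "start_line" = line + 1 then
      pvMkSpan line (pvGetKey first "end_line") (pvGetKey first "hits" + count) :: rest
    else
      pvMkSpan line line count :: first :: rest
  | [] => [pvMkSpan line line count]

def line_hits_to_spans_alt (hits : List (Int × Int)) : List (List (String × Int)) :=
  let totals := hits.foldl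
    (fun d p => if 0 < p.2 then d.insert p.1 (d.getD p.1 0 + p.2) else d)
    (PySem.Dict.empty : PySem.Dict Int Int)
  ((PySem.List.sorted totals.keys (fun x => x) false).reverse).foldl (pvStepB totals) []

-- ===== PRECONDITION & SPEC =====
def Spec_line_hits_to_spans (hits : List (Int × Int)) (out : List (List (String × Int))) : Prop := out = line_hits_to_spans_alt hits
instance (hits : List (Int × Int)) (out : List (List (String × Int))) : Decidable (Spec_line_hits_to_spans hits out) := by unfold Spec_line_hits_to_spans; infer_instance

-- ===== CLAIM (what is proved, stated in full; the proofs are below) =====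
def Claim_equal_line_hits_to_spans : Prop := ∀ (hits : List (Int × Int)), Dom_line_hits_to_spans hits → Spec_line_hits_to_spans hits (line_hits_to_spans hits)

-- ===== LEMMAS AND PROOFS =====

def pvCollapse : List (Int × Int) → List (Int × Int)
  | [] => []
  | [p] => [p]
  | p :: q :: t =>
    if p.1 = q.1 then pvCollapse ((p.1, p.2 + q.2) :: t) else p :: pvCollapse (q :: t)
termination_by l => l.length
def pvBspans (st pv tot : Int) : List (Int × Int) → List (List (String × Int))
  | [] => [pvMkSpan st pv tot]
  | (l, c) :: t =>
    if l = pv + 1 then pvBspans st l (tot + c) t else pvMkSpan st pv tot :: pvBspans l l c t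
def pvRunSpans : List (Int × Int) → List (List (String × Int))
  | [] => []
  | (l, c) :: t => pvBspans l l c t
def pvEnd (pv : Int) : List (Int × Int) → Int
  | [] => pv
  | (l, _) :: t => if l = pv + 1 then pvEnd l t else pv
def pvSum (pv : Int) : List (Int × Int) → Int
  | [] => 0
  | (l, c) :: t => if l = pv + 1 then c + pvSum l t else 0
def pvRest (pv : Int) : List (Int × Int) → List (Int × Int)
  | [] => []
  | (l, c) :: t => if l = pv + 1 then pvRest l t else (l, c) :: t
def pvAcore : List (Int × Int) → List (List (String × Int))
  | [] => []
  | (l, c) :: rest =>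
    let r := rest.foldl pvStepA ([], l, l, c)
    r.1 ++ [pvMkSpan r.2.1 r.2.2.1 r.2.2.2]
theorem pvStepA_merge (s : List (List (String × Int)) × Int × Int × Int) (l c c' : Int) :
    pvStepA (pvStepA s (l, c)) (l, c') = pvStepA s (l, c + c') := by
  obtain ⟨sp, st, pv, tot⟩ := s
  simp only [pvStepA]
  split_ifs with h1 h2 h2
  all_goals simp_all
  all_goals omega
theorem foldl_pvStepA_collapse (X : List (Int × Int)) :
    ∀ s, List.foldl pvStepA s (pvCollapse X) = List.foldl pvStepA s X := by
  fun_induction pvCollapse X with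
  | case1 => intro s; rfl
  | case2 p => intro s; rfl
  | case3 p q t h ih =>
    intro s
    rw [ih]
    obtain ⟨l, c⟩ := p; obtain ⟨l', c'⟩ := q
    simp only at h; subst h
    simp [List.foldl, pvStepA_merge]
  | case4 p q t h ih =>
    intro s
    simp [List.foldl, ih]

theorem pvCollapse_head (l c : Int) (t : List (Int × Int)) :
    ∃ c' t', pvCollapse ((l, c) :: t) = (l, c') :: t' := by
  induction t generalizing c with
  | nil => exact ⟨c, [], by simp [pvCollapse]⟩
  | cons q t ih =>
    by_cases h : l = q.1
    · subst h
      simp only [pvCollapse]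
      exact ih _
    · simp only [pvCollapse]
      rw [if_neg (by simpa using h)]
      exact ⟨c, _, rfl⟩

theorem pvCollapse_chain (S : List (Int × Int)) (h : (S.map Prod.fst).IsChain (· ≤ ·)) :
    ((pvCollapse S).map Prod.fst).IsChain (· < ·) := by
  fun_induction pvCollapse S with
  | case1 => exact List.isChain_nil
  | case2 p => exact List.isChain_singleton _
  | case3 p q t hpq ih =>
    apply ih
    simp only [List.map_cons, List.isChain_cons_cons] at h ⊢
    rcases t with _ | ⟨r, t⟩
    · simp
    · simp only [List.map_cons, List.isChain_cons_cons] at h ⊢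
      exact ⟨hpq ▸ h.2.1, h.2.2⟩
  | case4 p q t hpq ih =>
    simp only [List.map_cons, List.isChain_cons_cons] at h
    have hch := ih h.2
    obtain ⟨ql, qc⟩ := q
    obtain ⟨c', t', heq⟩ := pvCollapse_head ql qc t
    rw [heq] at hch ⊢
    simp only [List.map_cons, List.isChain_cons_cons] at hch ⊢
    refine ⟨lt_of_le_of_ne h.1 (by simpa using hpq), hch⟩

theorem pvCollapse_mem_fst (S : List (Int × Int)) (x : Int) :
    x ∈ (pvCollapse S).map Prod.fst ↔ x ∈ S.map Prod.fst := by
  fun_induction pvCollapse S with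
  | case1 => simp
  | case2 p => simp
  | case3 p q t hpq ih => simp only [List.map_cons, List.mem_cons] at ih ⊢; rw [ih, hpq]; tauto
  | case4 p q t hpq ih => simp only [List.map_cons, List.mem_cons] at ih ⊢; rw [ih]

theorem pv_sum_filter_cons (l : Int) (p : Int × Int) (X : List (Int × Int)) :
    ((List.filter (fun q => q.1 == l) (p :: X)).map (·.2)).sum
      = (if p.1 = l then p.2 else 0) + ((X.filter (fun q => q.1 == l)).map (·.2)).sum := by
  simp only [List.filter_cons, beq_iff_eq]
  split_ifs <;> simp

theorem pvCollapse_filter_sum (S : List (Int × Int)) (l : Int) :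
    (((pvCollapse S).filter (fun q => q.1 == l)).map (·.2)).sum
      = ((S.filter (fun q => q.1 == l)).map (·.2)).sum := by
  fun_induction pvCollapse S with
  | case1 => rfl
  | case2 p => rfl
  | case3 p q t hpq ih =>
    rw [ih, pv_sum_filter_cons, pv_sum_filter_cons, pv_sum_filter_cons, ← hpq]
    split_ifs <;> ring
  | case4 p q t hpq ih =>
    rw [pv_sum_filter_cons, pv_sum_filter_cons, ih]

theorem filter_eq_singleton_of_nodup_fst {G : List (Int × Int)} (h : (G.map Prod.fst).Nodup)
    {p : Int × Int} (hp : p ∈ G) : G.filter (fun q => q.1 == p.1) = [p] := by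
  induction G with
  | nil => simp at hp
  | cons a G ih =>
    simp only [List.map_cons, List.nodup_cons] at h
    rcases List.mem_cons.mp hp with rfl | hmem
    · have hnil : G.filter (fun q => q.1 == p.1) = [] := by
        rw [List.filter_eq_nil_iff]
        intro q hq hbad
        exact h.1 (List.mem_map.mpr ⟨q, hq, by simpa using hbad⟩)
      simp [hnil]
    · have hne : a.1 ≠ p.1 := fun e => h.1 (e ▸ List.mem_map.mpr ⟨p, hmem, rfl⟩)
      simp [beq_iff_eq, hne, ih h.2 hmem]

theorem pvAcore_collapse (X : List (Int × Int)) : pvAcore (pvCollapse X) = pvAcore X := by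
  fun_induction pvCollapse X with
  | case1 => rfl
  | case2 p => rfl
  | case3 p q t h ih =>
    rw [ih]
    obtain ⟨l, c⟩ := p; obtain ⟨l', c'⟩ := q
    simp only at h; subst h
    show pvAcore ((l, c + c') :: t) = pvAcore ((l, c) :: (l, c') :: t)
    simp [pvAcore, List.foldl, pvStepA]
  | case4 p q t h ih =>
    obtain ⟨l, c⟩ := p
    show pvAcore ((l, c) :: pvCollapse (q :: t)) = pvAcore ((l, c) :: q :: t)
    simp only [pvAcore]
    rw [foldl_pvStepA_collapse]

def pvFin (r : List (List (String × Int)) × Int × Int × Int) : List (List (String × Int)) :=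
  r.1 ++ [pvMkSpan r.2.1 r.2.2.1 r.2.2.2]

theorem foldl_pvStepA_bspans (G : List (Int × Int)) :
    ∀ (spans : List (List (String × Int))) (st pv tot : Int),
      ((pv :: G.map Prod.fst).IsChain (· < ·)) →
      pvFin (List.foldl pvStepA (spans, st, pv, tot) G)
        = spans ++ pvBspans st pv tot G := by
  induction G with
  | nil => intro spans st pv tot _; rfl
  | cons p t ih =>
    intro spans st pv tot hch
    obtain ⟨l, c⟩ := p
    simp only [List.map_cons, List.isChain_cons_cons] at hch
    by_cases hl : l = pv + 1
    · have hstep : pvStepA (spans, st, pv, tot) (l, c) = (spans, st, l, tot + c) := by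
        simp [pvStepA]; omega
      simp only [List.foldl, hstep]
      rw [ih spans st l (tot + c) hch.2]
      simp only [pvBspans, if_pos hl]
    · have hgt : ¬ (l ≤ pv + 1) := by omega
      have hstep : pvStepA (spans, st, pv, tot) (l, c)
          = (spans ++ [pvMkSpan st pv tot], l, l, c) := by
        simp [pvStepA, hgt]
      simp only [List.foldl, hstep]
      rw [ih _ l l c hch.2]
      simp [pvBspans, hl]

theorem pvBspans_eq (G : List (Int × Int)) :
    ∀ st pv tot, pvBspans st pv tot G
      = pvMkSpan st (pvEnd pv G) (tot + pvSum pv G) :: pvRunSpans (pvRest pv G) := by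
  induction G with
  | nil => intro st pv tot; simp [pvBspans, pvEnd, pvSum, pvRest, pvRunSpans]
  | cons p t ih =>
    intro st pv tot
    obtain ⟨l, c⟩ := p
    by_cases hl : l = pv + 1
    · simp only [pvBspans, pvEnd, pvSum, pvRest, if_pos hl]
      rw [ih]; ring_nf
    · simp only [pvBspans, pvEnd, pvSum, pvRest, if_neg hl]
      simp [pvRunSpans]

theorem pvGetKey_start (a b c : Int) : pvGetKey (pvMkSpan a b c) "start_line" = a := rfl
theorem pvGetKey_end (a b c : Int) : pvGetKey (pvMkSpan a b c) "end_line" = b := rfl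
theorem pvGetKey_hits (a b c : Int) : pvGetKey (pvMkSpan a b c) "hits" = c := rfl

theorem pvStepB_runSpans (totals : PySem.Dict Int Int) (l : Int) (M : List (Int × Int)) :
    pvStepB totals (pvRunSpans M) l = pvRunSpans ((l, totals.getD l 0) :: M) := by
  rcases M with _ | ⟨⟨l', c'⟩, t⟩
  · rfl
  · show pvStepB totals (pvBspans l' l' c' t) l = pvBspans l l (totals.getD l 0) ((l', c') :: t)
    rw [pvBspans_eq]
    by_cases hl : l' = l + 1
    · simp only [pvStepB, pvGetKey_start, pvGetKey_end, pvGetKey_hits, if_pos hl]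
      rw [show pvBspans l l (totals.getD l 0) ((l', c') :: t)
            = pvBspans l l' (totals.getD l 0 + c') t by simp [pvBspans, hl]]
      rw [pvBspans_eq]
      ring_nf
    · simp only [pvStepB, pvGetKey_start, pvGetKey_end, pvGetKey_hits, if_neg hl]
      rw [show pvBspans l l (totals.getD l 0) ((l', c') :: t)
            = pvMkSpan l l (totals.getD l 0) :: pvBspans l' l' c' t by simp [pvBspans, hl]]
      rw [pvBspans_eq]

theorem foldr_pvStepB (totals : PySem.Dict Int Int) (L : List Int) :
    L.foldr (fun l sp => pvStepB totals sp l) []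
      = pvRunSpans (L.map (fun l => (l, totals.getD l 0))) := by
  induction L with
  | nil => rfl
  | cons l L ih => simp only [List.foldr, ih, List.map_cons, pvStepB_runSpans]

theorem totals_getD (P : List (Int × Int)) :
    ∀ (d : PySem.Dict Int Int) (l : Int),
      (P.foldl (fun d p => d.insert p.1 (d.getD p.1 0 + p.2)) d).getD l 0
        = d.getD l 0 + ((P.filter (fun q => q.1 == l)).map (·.2)).sum := by
  induction P with
  | nil => intro d l; simp
  | cons p t ih =>
    intro d l
    simp only [List.foldl, ih, PySem.Dict.getD_insert, List.filter_cons, beq_iff_eq]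
    by_cases hl : p.1 = l
    · subst hl; simp; ring
    · simp [hl, Ne.symm hl]

-- ===== VERDICT (by name: the statement is the Claim_ definition above) =====
theorem line_hits_to_spans_spec : Claim_equal_line_hits_to_spans := by
  intro hits _
  unfold Spec_line_hits_to_spans
  set P := hits.filter (fun p => decide (0 < p.2)) with hPdef
  set S := PySem.List.sorted P (fun row => row.1) false with hSdef
  set G := pvCollapse S with hGdef
  set totals := hits.foldl
    (fun d p => if 0 < p.2 then d.insert p.1 (d.getD p.1 0 + p.2) else d)
    (PySem.Dict.empty : PySem.Dict Int Int) with htotdef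
  -- totals as a fold over the filtered list
  have htot : totals = P.foldl (fun d p => d.insert p.1 (d.getD p.1 0 + p.2)) PySem.Dict.empty := by
    rw [htotdef, hPdef, ← PySem.List.foldl_ite_eq_foldl_filter]
  have hgetD : ∀ l, totals.getD l 0 = ((P.filter (fun q => q.1 == l)).map (·.2)).sum := by
    intro l
    rw [htot, totals_getD]
    simp
  have hkeys : totals.keys = PySem.Set.ofList (P.map (fun p => p.1)) := by
    rw [htot, PySem.Dict.keys_foldl_insert_key]
    simp [PySem.Set.update_nil_left]
  have hnodupkeys : totals.keys.Nodup := by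
    rw [hkeys]; exact PySem.Set.nodup_ofList _
  -- sortedness of S and structure of G
  have hSmap : S.map Prod.fst = S.map (fun row => row.1) := rfl
  have hSpair : (S.map Prod.fst).Pairwise (· ≤ ·) := by
    rw [hSmap, hSdef]
    exact PySem.List.sorted_map_key_pairwise (xs := P) (key := fun row => row.1)
  have hSchain : (S.map Prod.fst).IsChain (· ≤ ·) :=
    List.isChain_iff_pairwise.mpr hSpair
  have hGchain : (G.map Prod.fst).IsChain (· < ·) := pvCollapse_chain S hSchain
  have hGpair : (G.map Prod.fst).Pairwise (· < ·) :=
    List.isChain_iff_pairwise.mp hGchain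
  have hGnodup : (G.map Prod.fst).Nodup := hGpair.imp ne_of_lt
  -- the A side computes the spans of G
  have hA : line_hits_to_spans hits = pvRunSpans G := by
    have h1 : line_hits_to_spans hits = pvAcore S := rfl
    rw [h1, ← pvAcore_collapse, ← hGdef]
    rcases hGcases : G with _ | ⟨⟨l, c⟩, rest⟩
    · rfl
    · have hch : ((l :: rest.map Prod.fst).IsChain (· < ·)) := by
        have := hGchain; rw [hGcases] at this; simpa using this
      have := foldl_pvStepA_bspans rest [] l l c hch
      simp only [pvFin] at this
      simpa [pvAcore, pvRunSpans] using this
  -- the B side: the sorted distinct lines are exactly G's lines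
  have hmemPS : ∀ x : Int, x ∈ S.map Prod.fst ↔ x ∈ P.map Prod.fst := by
    intro x
    exact ((PySem.List.sorted_perm (xs := P) (key := fun row => row.1) (rev := false)).map Prod.fst).mem_iff
  have hmem : ∀ x : Int, x ∈ G.map Prod.fst ↔ x ∈ totals.keys := by
    intro x
    rw [hkeys, PySem.Set.mem_ofList, pvCollapse_mem_fst, hmemPS]
  have hperm : (G.map Prod.fst).Perm totals.keys :=
    (List.perm_ext_iff_of_nodup hGnodup hnodupkeys).mpr hmem
  have hLasc : PySem.List.sorted totals.keys (fun x => x) false = G.map Prod.fst :=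
    PySem.List.sorted_eq_of_perm_of_pairwise_lt totals.keys (G.map Prod.fst) (fun x => x) hperm hGpair
  -- each of G's entries carries the total of its line
  have hGtot : ∀ p ∈ G, totals.getD p.1 0 = p.2 := by
    intro p hp
    have hfs : ((S.filter (fun q => q.1 == p.1)).map (·.2)).sum
        = ((P.filter (fun q => q.1 == p.1)).map (·.2)).sum := by
      exact List.Perm.sum_eq (List.Perm.map _ (List.Perm.filter _
        (PySem.List.sorted_perm (xs := P) (key := fun row => row.1) (rev := false))))
    rw [hgetD, ← hfs, ← pvCollapse_filter_sum, ← hGdef,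
      filter_eq_singleton_of_nodup_fst hGnodup hp]
    simp
  have hB : line_hits_to_spans_alt hits = pvRunSpans G := by
    show ((PySem.List.sorted totals.keys (fun x => x) false).reverse).foldl (pvStepB totals) []
      = pvRunSpans G
    rw [List.foldl_reverse, foldr_pvStepB, hLasc]
    congr 1
    rw [List.map_map]
    have : ∀ p ∈ G, ((fun l => (l, totals.getD l 0)) ∘ Prod.fst) p = id p := by
      intro p hp
      simp [Function.comp, hGtot p hp]
    rw [List.map_congr_left this, List.map_id]
  rw [hA, hB]
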